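-- pv_equiv track=rewrite | github.com/shinejohn/cortex | discover.py | _identify_key_files
-- ===== SOURCE A (Python) =====
-- def _identify_key_files(tree: list[str]) -> list[str]:
--     key_patterns = [
--         "Dockerfile", "docker-compose.yml", "docker-compose.yaml",
--         "railway.toml", "railway.json", "nixpacks.toml", "Procfile",
--         "composer.json", "artisan", ".env.example",
--         "config/database.php", "config/queue.php", "config/cache.php",
--         "config/horizon.php", "config/app.php",
--         "routes/web.php", "routes/api.php",
--         "package.json", "tsconfig.json", "vite.config.ts", "vite.config.js",
--         "tailwind.config.js", "tailwind.config.ts",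
--         "requirements.txt", "pyproject.toml",
--         "README.md",
--     ]
--     matches = []
--     for f in tree:
--         for pattern in key_patterns:
--             if f == pattern or f.endswith("/" + pattern):
--                 matches.append(f)
--                 break
--     return matches[:20]
-- ===== SOURCE B (Python) =====
-- _SINGLE = frozenset([
--     "Dockerfile", "docker-compose.yml", "docker-compose.yaml",
--     "railway.toml", "railway.json", "nixpacks.toml", "Procfile",
--     "composer.json", "artisan", ".env.example",
--     "package.json", "tsconfig.json", "vite.config.ts", "vite.config.js",
--     "tailwind.config.js", "tailwind.config.ts",
--     "requirements.txt", "pyproject.toml",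
--     "README.md",
-- ])
--
-- _DOUBLE = frozenset([
--     "config/database.php", "config/queue.php", "config/cache.php",
--     "config/horizon.php", "config/app.php",
--     "routes/web.php", "routes/api.php",
-- ])
--
-- def _identify_key_files(tree: list[str]) -> list[str]:
--     matches = []
--     for f in tree:
--         segments = f.split("/")
--         last = segments[-1]
--         last2 = "/".join(segments[-2:])
--         if last in _SINGLE or last2 in _DOUBLE:
--             matches.append(f)
--     return matches[:20]
-- ===== Notes on version B (the rewrite author's own statement) =====
-- stated objective: faster
-- what changed: Instead of scanning all 26 patterns per file with equality/endswith tests, B splits each file path once into segments and does two O(1) frozenset membership tests (last segment against the single-segment patterns, last two segments against the two-segment patterns).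
import Mathlib
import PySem

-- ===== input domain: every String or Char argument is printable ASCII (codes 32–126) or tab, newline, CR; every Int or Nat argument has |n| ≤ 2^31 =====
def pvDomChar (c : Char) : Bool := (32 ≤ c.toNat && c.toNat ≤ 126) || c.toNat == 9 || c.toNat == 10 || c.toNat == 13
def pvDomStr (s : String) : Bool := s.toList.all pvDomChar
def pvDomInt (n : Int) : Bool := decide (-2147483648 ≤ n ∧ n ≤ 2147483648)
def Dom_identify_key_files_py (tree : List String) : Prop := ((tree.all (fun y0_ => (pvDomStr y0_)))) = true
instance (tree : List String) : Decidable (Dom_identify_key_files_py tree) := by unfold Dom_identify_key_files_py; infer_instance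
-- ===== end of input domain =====

-- B replaces A's 26 equality/endswith tests per file by one split of the path and two set lookups
-- (last segment vs the single-segment patterns, last two segments vs the two-segment patterns);
-- same matches in the same order, capped at 20.


-- ===== PORT A =====
-- helper: the literal key_patterns list of A
def pvKeyPatterns : List String := [
  "Dockerfile", "docker-compose.yml", "docker-compose.yaml",
  "railway.toml", "railway.json", "nixpacks.toml", "Procfile",
  "composer.json", "artisan", ".env.example",
  "config/database.php", "config/queue.php", "config/cache.php",
  "config/horizon.php", "config/app.php",
  "routes/web.php", "routes/api.php",
  "package.json", "tsconfig.json", "vite.config.ts", "vite.config.js",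
  "tailwind.config.js", "tailwind.config.ts",
  "requirements.txt", "pyproject.toml",
  "README.md"]

-- inner 'for pattern … if …: append; break' = append f iff some pattern matches
def pvAMatch (f : String) : Bool :=
  pvKeyPatterns.any (fun p => f == p || PySem.Str.endswith f ("/" ++ p))

def identify_key_files_py (tree : List String) : List String :=
  (tree.foldl (fun ms f => if pvAMatch f then ms ++ [f] else ms) []).take 20

-- ===== PORT B =====
-- the two frozensets of Source B (literals are distinct, as in the Python)
def pvSingleSet : PySem.Set String := PySem.Set.ofList [
  "Dockerfile", "docker-compose.yml", "docker-compose.yaml",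
  "railway.toml", "railway.json", "nixpacks.toml", "Procfile",
  "composer.json", "artisan", ".env.example",
  "package.json", "tsconfig.json", "vite.config.ts", "vite.config.js",
  "tailwind.config.js", "tailwind.config.ts",
  "requirements.txt", "pyproject.toml",
  "README.md"]

def pvDoubleSet : PySem.Set String := PySem.Set.ofList [
  "config/database.php", "config/queue.php", "config/cache.php",
  "config/horizon.php", "config/app.php",
  "routes/web.php", "routes/api.php"]

-- per-file test of Source B: split once, look up last one / last two segments
def pvBMatch (f : String) : Bool :=
  let segments := (PySem.Str.split? f "/").getD []   -- separator "/" is nonempty: split never raises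
  let last := (PySem.List.pyGet? segments (-1)).getD ""   -- split always returns ≥ 1 segment: [-1] never raises
  let last2 := PySem.Str.join "/" (PySem.List.slice segments (some (-2)) none)
  PySem.Set.contains pvSingleSet last || PySem.Set.contains pvDoubleSet last2

def identify_key_files_py_alt (tree : List String) : List String :=
  (tree.foldl (fun ms f => if pvBMatch f then ms ++ [f] else ms) []).take 20

-- ===== PRECONDITION & SPEC =====
def Spec_identify_key_files_py (tree : List String) (out : List String) : Prop := out = identify_key_files_py_alt tree
instance (tree : List String) (out : List String) : Decidable (Spec_identify_key_files_py tree out) := by unfold Spec_identify_key_files_py; infer_instance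

-- ===== CLAIM (what is proved, stated in full; the proofs are below) =====
def Claim_equal_identify_key_files_py : Prop := ∀ (tree : List String), Dom_identify_key_files_py tree → Spec_identify_key_files_py tree (identify_key_files_py tree)

-- ===== LEMMAS AND PROOFS =====

def pvSplit : List Char → List (List Char)
  | [] => [[]]
  | c :: rest =>
    if c = '/' then [] :: pvSplit rest
    else
      match pvSplit rest with
      | [] => [[c]]
      | h :: t => (c :: h) :: t

def pvGlue (pre : List Char) : List (List Char) → List (List Char)
  | [] => [pre]
  | h :: t => (pre ++ h) :: t

theorem pvSplit_length (cs : List Char) : (pvSplit cs).length = cs.count '/' + 1 := by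
  induction cs with
  | nil => simp [pvSplit]
  | cons c rest ih =>
    by_cases h : c = '/'
    · simp [pvSplit, h, ih]
    · cases hm : pvSplit rest with
      | nil => rw [hm] at ih; simp at ih
      | cons hd tl =>
        rw [hm] at ih
        simp [pvSplit, h, hm, ← ih]

theorem pvSplit_ne_nil (cs : List Char) : pvSplit cs ≠ [] := by
  intro h
  have := pvSplit_length cs
  rw [h] at this; simp at this

theorem pvGo (l : List Char) : ∀ (fuel : Nat) (cur : List Char) (acc : List (List Char)),
    l.length ≤ fuel →
    PySem.Chars.splitOn.go ['/'] fuel l cur acc = acc.reverse ++ pvGlue cur.reverse (pvSplit l) := by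
  induction l with
  | nil =>
    intro fuel cur acc _
    cases fuel with
    | zero => simp [PySem.Chars.splitOn.go, pvSplit, pvGlue]
    | succ f => simp [PySem.Chars.splitOn.go, pvSplit, pvGlue]
  | cons c rest ih =>
    intro fuel cur acc hle
    cases fuel with
    | zero => simp at hle
    | succ f =>
      have hstep : PySem.Chars.splitOn.go ['/'] (f+1) (c :: rest) cur acc =
          (if c = '/' then PySem.Chars.splitOn.go ['/'] f rest [] (cur.reverse :: acc)
           else PySem.Chars.splitOn.go ['/'] f rest (c :: cur) acc) := by
        rw [PySem.Chars.splitOn.go]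
        by_cases h : c = '/'
        · simp [List.isPrefixOf, h]
        · simp [List.isPrefixOf, h]
          intro h'; exact absurd h'.symm h
      rw [hstep]
      have hlen : rest.length ≤ f := by simp at hle; omega
      by_cases h : c = '/'
      · rw [if_pos h, ih f [] (cur.reverse :: acc) hlen]
        cases hm : pvSplit rest with
        | nil => exact absurd hm (pvSplit_ne_nil rest)
        | cons hd tl => simp [pvSplit, h, hm, pvGlue]
      · rw [if_neg h, ih f (c :: cur) acc hlen]
        cases hm : pvSplit rest with
        | nil => exact absurd hm (pvSplit_ne_nil rest)
        | cons hd tl => simp [pvSplit, h, hm, pvGlue]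

theorem pvSplitOn_eq (cs : List Char) : PySem.Chars.splitOn cs ['/'] = pvSplit cs := by
  rw [PySem.Chars.splitOn, pvGo cs (cs.length + 1) [] [] (by omega)]
  cases hm : pvSplit cs with
  | nil => exact absurd hm (pvSplit_ne_nil cs)
  | cons hd tl => simp [pvGlue]

theorem pvJoin_split (cs : List Char) : PySem.Chars.join ['/'] (pvSplit cs) = cs := by
  induction cs with
  | nil => simp [pvSplit, PySem.Chars.join_singleton]
  | cons c rest ih =>
    by_cases h : c = '/'
    · cases hm : pvSplit rest with
      | nil => exact absurd hm (pvSplit_ne_nil rest)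
      | cons hd tl =>
        rw [hm] at ih
        rw [pvSplit, if_pos h, hm, PySem.Chars.join_cons_cons, ih, h]
        rfl
    · cases hm : pvSplit rest with
      | nil => exact absurd hm (pvSplit_ne_nil rest)
      | cons hd tl =>
        rw [hm] at ih
        cases tl with
        | nil =>
          rw [PySem.Chars.join_singleton] at ih
          simp [pvSplit, h, hm, PySem.Chars.join_singleton, ih]
        | cons x xs =>
          rw [PySem.Chars.join_cons_cons] at ih
          rw [pvSplit, if_neg h, hm, PySem.Chars.join_cons_cons]
          simp [← ih]

def pvSeg1 : List Char → List Char
  | [] => []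
  | c :: rest => if '/' ∈ c :: rest then pvSeg1 rest else c :: rest

def pvSeg2 : List Char → List Char
  | [] => []
  | c :: rest => if 2 ≤ (c :: rest).count '/' then pvSeg2 rest else c :: rest

theorem pvSplit_no_slash (cs : List Char) (h : '/' ∉ cs) : pvSplit cs = [cs] := by
  induction cs with
  | nil => rfl
  | cons c rest ih =>
    simp at h
    rw [pvSplit, if_neg (fun hc => h.1 hc.symm), ih h.2]

theorem pvSplit_getLast? (cs : List Char) : (pvSplit cs).getLast? = some (pvSeg1 cs) := by
  induction cs with
  | nil => rfl
  | cons c rest ih =>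
    by_cases h : c = '/'
    · rw [pvSplit, if_pos h, pvSeg1, if_pos (by simp [h]),
        List.getLast?_cons, ih]
      simp
    · by_cases hr : '/' ∈ rest
      · cases hm : pvSplit rest with
        | nil => exact absurd hm (pvSplit_ne_nil rest)
        | cons hd tl =>
          cases tl with
          | nil =>
            have := pvSplit_length rest
            rw [hm] at this
            simp at this
            exact absurd hr (by rw [← List.count_eq_zero]; omega)
          | cons x xs =>
            rw [hm] at ih
            rw [pvSplit, if_neg h, hm, pvSeg1, if_pos (by simp [hr]), ← ih]
            simp
      · rw [pvSplit, if_neg h, pvSplit_no_slash rest hr, pvSeg1,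
            if_neg (by simp [hr]; exact fun hc => absurd hc.symm h)]
        rfl

theorem pvSplit_last2 (cs : List Char) :
    PySem.Chars.join ['/'] ((pvSplit cs).drop ((pvSplit cs).length - 2)) = pvSeg2 cs := by
  induction cs with
  | nil => simp [pvSplit, pvSeg2, PySem.Chars.join_singleton]
  | cons c rest ih =>
    by_cases h2 : 2 ≤ (c :: rest).count '/'
    · rw [pvSeg2, if_pos h2, ← ih]
      congr 1
      by_cases h : c = '/'
      · have hl := pvSplit_length rest
        have hcnt : (c :: rest).count '/' = rest.count '/' + 1 := by simp [h]
        rw [pvSplit, if_pos h]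
        have hstep : (([] :: pvSplit rest).length - 2) = ((pvSplit rest).length - 2) + 1 := by
          simp; omega
        rw [hstep, List.drop_succ_cons]
      · have hl := pvSplit_length rest
        have hcnt : (c :: rest).count '/' = rest.count '/' := by
          simp [List.count_cons]; exact fun hc => h hc
        cases hm : pvSplit rest with
        | nil => exact absurd hm (pvSplit_ne_nil rest)
        | cons hd tl =>
          rw [pvSplit, if_neg h, hm]
          rw [hm] at hl
          simp only [List.length_cons] at hl
          have h3 : 2 ≤ tl.length := by omega
          have hstep : ((c :: hd) :: tl).length - 2 = (tl.length - 2) + 1 := by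
            simp only [List.length_cons]; omega
          have hstep2 : (hd :: tl).length - 2 = (tl.length - 2) + 1 := by
            simp only [List.length_cons]; omega
          rw [hstep, hstep2, List.drop_succ_cons, List.drop_succ_cons]
    · rw [pvSeg2, if_neg h2]
      have hlen : (pvSplit (c :: rest)).length ≤ 2 := by
        rw [pvSplit_length]; omega
      rw [Nat.sub_eq_zero_of_le hlen, List.drop_zero, pvJoin_split]

theorem pvSeg1_eq_iff (cs p : List Char) (hp : '/' ∉ p) :
    pvSeg1 cs = p ↔ (cs = p ∨ ('/' :: p) <:+ cs) := by
  induction cs with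
  | nil =>
    rw [pvSeg1]
    constructor
    · intro h; left; exact h
    · rintro (h | hs)
      · exact h
      · simp at hs
  | cons c rest ih =>
    by_cases h : '/' ∈ c :: rest
    · rw [pvSeg1, if_pos h, ih]
      rw [List.suffix_cons_iff]
      constructor
      · rintro (hrp | hs)
        · subst hrp
          simp at h
          rcases h with h | h
          · right; left; rw [← h]
          · exact absurd h hp
        · right; right; exact hs
      · rintro (hcs | hceq | hs)
        · exfalso; exact hp (hcs ▸ h)
        · injection hceq with h1 h2; left; exact h2.symm
        · right; exact hs
    · rw [pvSeg1, if_neg h]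
      constructor
      · intro hcp; left; exact hcp
      · rintro (hcp | hs)
        · exact hcp
        · exfalso; exact h (hs.subset (by simp))

theorem pvSeg2_eq_iff (cs q : List Char) (hq : q.count '/' = 1) :
    pvSeg2 cs = q ↔ (cs = q ∨ ('/' :: q) <:+ cs) := by
  induction cs with
  | nil =>
    constructor
    · intro h
      exfalso
      rw [pvSeg2] at h
      subst h
      simp at hq
    · rintro (h | hs)
      · subst h; rfl
      · simp at hs
  | cons c rest ih =>
    by_cases h2 : 2 ≤ (c :: rest).count '/'
    · rw [pvSeg2, if_pos h2, ih]
      rw [List.suffix_cons_iff]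
      constructor
      · rintro (hrq | hs)
        · subst hrq
          have hc : c = '/' := by
            by_contra hc
            rw [List.count_cons, if_neg (by simpa using hc)] at h2
            omega
          right; left; rw [hc]
        · right; right; exact hs
      · rintro (hcq | hceq | hs)
        · exfalso
          rw [hcq, hq] at h2
          exact absurd h2 (by norm_num)
        · injection hceq with h1 h2'; left; exact h2'.symm
        · right; exact hs
    · rw [pvSeg2, if_neg h2]
      constructor
      · intro hcq; left; exact hcq
      · rintro (hcq | hs)
        · exact hcq
        · exfalso
          obtain ⟨t, ht⟩ := hs
          rw [← ht, List.count_append, List.count_cons] at h2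
          simp [hq] at h2


theorem pvGet_neg_one {α : Type} (l : List α) (h : l ≠ []) :
    PySem.List.pyGet? l (-1) = l.getLast? := by
  have hl : 1 ≤ l.length := List.length_pos_iff.mpr h
  rw [PySem.List.pyGet?, PySem.List.pyIdx?]
  rw [if_neg (by omega), if_pos (by exact_mod_cast by omega : -(l.length:Int) ≤ -1)]
  simp [List.getLast?_eq_getElem?]

theorem pvSlice_neg2 {α : Type} (l : List α) :
    PySem.List.slice l (some (-2)) none = l.drop (l.length - 2) := by
  simp only [PySem.List.slice, PySem.List.clampIdx]
  norm_num
  rcases l with _ | ⟨a, _ | ⟨b, t⟩⟩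
  · simp
  · simp
  · have h1 : ((t.length : Int) + 1 + 1 + -2).toNat = t.length := by omega
    have h2 : t.length + 1 + 1 - t.length = 2 := by omega
    simp [h1, h2]

theorem pvBMatch_eq (f : String) :
    pvBMatch f = (PySem.Set.contains pvSingleSet (String.ofList (pvSeg1 f.toList)) ||
                  PySem.Set.contains pvDoubleSet (String.ofList (pvSeg2 f.toList))) := by
  have hsplit : (PySem.Str.split? f "/").getD [] = (pvSplit f.toList).map String.ofList := by
    rw [PySem.Str.split?]
    simp [PySem.Chars.split?, pvSplitOn_eq]
  have hlast : (PySem.List.pyGet? ((pvSplit f.toList).map String.ofList) (-1)).getD "" =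
      String.ofList (pvSeg1 f.toList) := by
    rw [pvGet_neg_one _ (by simp [pvSplit_ne_nil])]
    rw [List.getLast?_map, pvSplit_getLast?]
    rfl
  have hlast2 : PySem.Str.join "/" (PySem.List.slice ((pvSplit f.toList).map String.ofList) (some (-2)) none) =
      String.ofList (pvSeg2 f.toList) := by
    rw [pvSlice_neg2, PySem.Str.join]
    rw [List.length_map, ← List.map_drop]
    rw [List.map_map]
    have hco : String.toList ∘ String.ofList = id := by
      funext x; simp
    rw [hco, List.map_id]
    have h2 := pvSplit_last2 f.toList
    rw [show ("/" : String).toList = ['/'] from rfl, h2]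
  simp only [pvBMatch]
  rw [hsplit, hlast, hlast2]

theorem pvAtomS (f p : String) (hp : '/' ∉ p.toList) :
    (f == p || PySem.Str.endswith f ("/" ++ p)) = (String.ofList (pvSeg1 f.toList) == p) := by
  rw [Bool.eq_iff_iff]
  simp only [Bool.or_eq_true, beq_iff_eq, PySem.Str.endswith_eq, PySem.Chars.endswith_iff]
  rw [show ("/" ++ p).toList = '/' :: p.toList by simp]
  rw [show (f = p) ↔ (f.toList = p.toList) from String.ext_iff]
  rw [show (String.ofList (pvSeg1 f.toList) = p) ↔ (pvSeg1 f.toList = p.toList) by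
    rw [String.ext_iff]; simp]
  exact (pvSeg1_eq_iff f.toList p.toList hp).symm

theorem pvAtomD (f q : String) (hq : q.toList.count '/' = 1) :
    (f == q || PySem.Str.endswith f ("/" ++ q)) = (String.ofList (pvSeg2 f.toList) == q) := by
  rw [Bool.eq_iff_iff]
  simp only [Bool.or_eq_true, beq_iff_eq, PySem.Str.endswith_eq, PySem.Chars.endswith_iff]
  rw [show ("/" ++ q).toList = '/' :: q.toList by simp]
  rw [show (f = q) ↔ (f.toList = q.toList) from String.ext_iff]
  rw [show (String.ofList (pvSeg2 f.toList) = q) ↔ (pvSeg2 f.toList = q.toList) by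
    rw [String.ext_iff]; simp]
  exact (pvSeg2_eq_iff f.toList q.toList hq).symm

theorem pvMatch_eq (f : String) : pvAMatch f = pvBMatch f := by
  rw [pvBMatch_eq]
  have h1 : pvSingleSet = [
    "Dockerfile", "docker-compose.yml", "docker-compose.yaml",
    "railway.toml", "railway.json", "nixpacks.toml", "Procfile",
    "composer.json", "artisan", ".env.example",
    "package.json", "tsconfig.json", "vite.config.ts", "vite.config.js",
    "tailwind.config.js", "tailwind.config.ts",
    "requirements.txt", "pyproject.toml",
    "README.md"] := by decide
  have h2 : pvDoubleSet = [
    "config/database.php", "config/queue.php", "config/cache.php",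
    "config/horizon.php", "config/app.php",
    "routes/web.php", "routes/api.php"] := by decide
  rw [h1, h2]
  simp only [pvAMatch, pvKeyPatterns, List.any_cons, List.any_nil, PySem.Set.contains,
    List.contains_cons, List.elem_nil, Bool.or_false]
  rw [pvAtomS f "Dockerfile" (by decide), pvAtomS f "docker-compose.yml" (by decide),
    pvAtomS f "docker-compose.yaml" (by decide), pvAtomS f "railway.toml" (by decide),
    pvAtomS f "railway.json" (by decide), pvAtomS f "nixpacks.toml" (by decide),
    pvAtomS f "Procfile" (by decide), pvAtomS f "composer.json" (by decide),
    pvAtomS f "artisan" (by decide), pvAtomS f ".env.example" (by decide),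
    pvAtomD f "config/database.php" (by decide), pvAtomD f "config/queue.php" (by decide),
    pvAtomD f "config/cache.php" (by decide), pvAtomD f "config/horizon.php" (by decide),
    pvAtomD f "config/app.php" (by decide), pvAtomD f "routes/web.php" (by decide),
    pvAtomD f "routes/api.php" (by decide), pvAtomS f "package.json" (by decide),
    pvAtomS f "tsconfig.json" (by decide), pvAtomS f "vite.config.ts" (by decide),
    pvAtomS f "vite.config.js" (by decide), pvAtomS f "tailwind.config.js" (by decide),
    pvAtomS f "tailwind.config.ts" (by decide), pvAtomS f "requirements.txt" (by decide),
    pvAtomS f "pyproject.toml" (by decide), pvAtomS f "README.md" (by decide)]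
  ac_rfl

theorem identify_key_files_py_spec : Claim_equal_identify_key_files_py := by
  intro tree _
  unfold Spec_identify_key_files_py identify_key_files_py identify_key_files_py_alt
  rw [show (fun (ms : List String) f => if pvAMatch f then ms ++ [f] else ms) =
      (fun (ms : List String) f => if pvBMatch f then ms ++ [f] else ms) by
    funext ms f; rw [pvMatch_eq]]
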